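-- pv_equiv track=rewrite | github.com/shrutityagi4102/myleetcodesolutions | 188.py | deleteGreatestValue
-- ===== SOURCE A (Python) =====
-- from typing import List
--
-- def deleteGreatestValue(grid: List[List[int]]) -> int:
--     ans = 0
--     l = len(grid[0])
--     for i in range(l):
--         m = []
--         for r in grid:
--             m.append(max(r))
--             del r[r.index(max(r))]
--         ans += max(m)
--     return ans
-- ===== SOURCE B (Python) =====
-- from typing import List
--
-- def deleteGreatestValue(grid: List[List[int]]) -> int:
--     # Sort each row descending once; round i then takes column i of the
--     # sorted rows, so the answer is the sum of column-wise maxima.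
--     cols = zip(*(sorted(row, reverse=True) for row in grid))
--     return sum(max(col) for col in cols)
-- ===== Notes on version B (the rewrite author's own statement) =====
-- stated objective: faster
-- what changed: Instead of repeatedly scanning each row for its max and deleting it (and mutating the input), B sorts each row descending once and sums the column-wise maxima of the sorted rows.
import Mathlib
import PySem

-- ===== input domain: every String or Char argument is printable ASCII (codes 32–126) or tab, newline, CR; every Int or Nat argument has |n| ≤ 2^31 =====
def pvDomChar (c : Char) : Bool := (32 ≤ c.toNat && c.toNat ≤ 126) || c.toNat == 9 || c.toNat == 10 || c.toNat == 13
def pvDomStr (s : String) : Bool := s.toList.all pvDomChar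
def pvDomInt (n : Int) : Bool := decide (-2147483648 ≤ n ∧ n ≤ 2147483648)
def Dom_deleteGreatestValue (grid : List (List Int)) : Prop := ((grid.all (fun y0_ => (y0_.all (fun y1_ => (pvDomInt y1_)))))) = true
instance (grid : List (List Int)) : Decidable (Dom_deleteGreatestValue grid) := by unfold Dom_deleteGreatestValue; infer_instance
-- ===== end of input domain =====

-- B sorts each row descending once and sums column-wise maxima, instead of A's repeated
-- max-scan-and-delete rounds; A mutates its argument rows in place (del r[...]) while B does
-- not — the equivalence proved here is about the return value only.

-- ===== PORT A =====
-- one body of A's inner loop: m.append(max(r)); del r[r.index(max(r))]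
def pyRowStep (r : List Int) : Int × List Int :=
  match PySem.List.max? r (fun x => x) with
  | none => (0, r)        -- unreachable under Pre_: max([]) raises ValueError in Python
  | some m =>
    match PySem.List.index? r m with
    | none => (m, r)      -- unreachable: m ∈ r
    | some i => (m, r.eraseIdx i)

-- one round 'for r in grid: …', accumulating m and the mutated rows in order
def pyRound (g : List (List Int)) : List Int × List (List Int) :=
  g.foldl (fun acc r => (acc.1 ++ [(pyRowStep r).1], acc.2 ++ [(pyRowStep r).2])) ([], [])

-- 'for i in range(l): … ; ans += max(m)'
def loopA : Nat → List (List Int) → Int → Int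
  | 0, _, ans => ans
  | n+1, g, ans =>
    let p := pyRound g
    loopA n p.2 (ans + (PySem.List.max? p.1 (fun x => x)).getD 0)

def deleteGreatestValue (grid : List (List Int)) : Int :=
  match grid with
  | [] => 0               -- unreachable under Pre_: grid[0] raises IndexError in Python
  | g0 :: _ => loopA g0.length grid 0

-- ===== PORT B =====
def sortDesc (r : List Int) : List Int := PySem.List.sorted r (fun x => x) true

def deleteGreatestValue_alt (grid : List (List Int)) : Int :=
  let rows := grid.map sortDesc
  -- zip(*rows) yields min-row-length many columns (0 columns when there are no rows)
  let k : Nat := match rows.map List.length with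
                 | [] => 0
                 | x :: t => t.foldl min x
  (List.range k).foldl
    (fun acc i =>
      acc + (PySem.List.max? (rows.map (fun r => r.getD i 0)) (fun x => x)).getD 0) 0

-- ===== PRECONDITION & SPEC =====
-- Pre_ excludes exactly the inputs where Python A raises: the empty grid (IndexError on
-- grid[0]) and grids with a row shorter than the first row (ValueError: max of empty row).
def Pre_deleteGreatestValue (grid : List (List Int)) : Prop :=
  grid ≠ [] ∧ ∀ r ∈ grid, (grid.headD []).length ≤ r.length
instance (grid : List (List Int)) : Decidable (Pre_deleteGreatestValue grid) := by
  unfold Pre_deleteGreatestValue; infer_instance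

def pvWitness_deleteGreatestValue : List (List Int) := [[3, 1], [2, 2]]

def Spec_deleteGreatestValue (grid : List (List Int)) (out : Int) : Prop :=
  out = deleteGreatestValue_alt grid
instance (grid : List (List Int)) (out : Int) : Decidable (Spec_deleteGreatestValue grid out) := by
  unfold Spec_deleteGreatestValue; infer_instance

-- ===== CLAIM (what is proved, stated in full; the proofs are below) =====
def Claim_equal_deleteGreatestValue : Prop :=
  ∀ (grid : List (List Int)), Dom_deleteGreatestValue grid →
    Pre_deleteGreatestValue grid →
    Spec_deleteGreatestValue grid (deleteGreatestValue grid)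

-- ===== LEMMAS AND PROOFS =====

-- the common reference value: sum over the first n columns of the descending-sorted rows
def colSum : Nat → List (List Int) → Int
  | 0, _ => 0
  | n+1, rows =>
      (PySem.List.max? (rows.map (fun r => r.getD 0 0)) (fun x => x)).getD 0
        + colSum n (rows.map List.tail)

theorem sortDesc_perm (r : List Int) : (sortDesc r).Perm r :=
  PySem.List.sorted_perm r (fun x => x) true

theorem sortDesc_pairwise (r : List Int) : (sortDesc r).Pairwise (fun a b => b ≤ a) :=
  PySem.List.sorted_pairwise_rev r (fun x => x)

theorem sortDesc_eq_of_perm {x y : List Int} (h : x.Perm y) : sortDesc x = sortDesc y := by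
  refine List.Perm.eq_of_pairwise (fun a b _ _ h1 h2 => le_antisymm h2 h1)
    (sortDesc_pairwise x) (sortDesc_pairwise y) ?_
  exact ((sortDesc_perm x).trans h).trans (sortDesc_perm y).symm

theorem sortDesc_length (r : List Int) : (sortDesc r).length = r.length :=
  (sortDesc_perm r).length_eq

-- pyRowStep on a nonempty row: emits the head of the sorted row, and the remainder sorts
-- to the tail of the sorted row.
theorem pyRowStep_spec (r : List Int) (m : Int) (t : List Int) (h : sortDesc r = m :: t) :
    (pyRowStep r).1 = m ∧ sortDesc (pyRowStep r).2 = t := by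
  have hrne : r ≠ [] := by
    intro hnil; rw [hnil] at h; simp [sortDesc, PySem.List.sorted] at h
  have hmem : m ∈ r := (sortDesc_perm r).subset (by rw [h]; exact List.mem_cons_self)
  have hmax : ∀ y ∈ r, y ≤ m := PySem.List.key_head_sorted_rev_ge r (fun x => x) h
  obtain ⟨m0, hm0⟩ : ∃ m0, PySem.List.max? r (fun x => x) = some m0 := by
    cases hm : PySem.List.max? r (fun x => x) with
    | none => exact absurd ((PySem.List.max?_eq_none_iff _ _).mp hm) hrne
    | some m0 => exact ⟨m0, rfl⟩
  have hm0mem : m0 ∈ r := PySem.List.max?_mem hm0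
  have hm0max : ∀ y ∈ r, y ≤ m0 := PySem.List.max?_isMax hm0
  have hmm0 : m0 = m := le_antisymm (hmax m0 hm0mem) (hm0max m hmem)
  subst hmm0
  obtain ⟨i, hi⟩ : ∃ i, PySem.List.index? r m0 = some i := by
    cases hidx : PySem.List.index? r m0 with
    | none =>
      exact absurd hmem ((PySem.List.index?_eq_none_iff _ _).mp hidx)
    | some i => exact ⟨i, rfl⟩
  have hstep : pyRowStep r = (m0, r.eraseIdx i) := by
    simp only [pyRowStep, hm0, hi]
  have herase : r.eraseIdx i = r.erase m0 := by
    have : List.idxOf? m0 r = some i := by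
      rw [← PySem.List.index?_eq_idxOf?]; exact hi
    rw [List.erase_eq_eraseIdx, this]
  refine ⟨by rw [hstep], ?_⟩
  rw [hstep]
  have hperm : (r.eraseIdx i).Perm t := by
    rw [herase]
    have h1 : (r.erase m0).Perm ((m0 :: t).erase m0) :=
      List.Perm.erase m0 (h ▸ (sortDesc_perm r).symm)
    simpa using h1
  rw [sortDesc_eq_of_perm hperm]
  exact PySem.List.sorted_rev_eq_self_of_pairwise t (fun x => x)
    ((List.pairwise_cons.mp (h ▸ sortDesc_pairwise r)).2)

theorem pyRound_go (g : List (List Int)) (a : List Int) (b : List (List Int)) :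
    g.foldl (fun acc r => (acc.1 ++ [(pyRowStep r).1], acc.2 ++ [(pyRowStep r).2])) (a, b)
      = (a ++ g.map (fun r => (pyRowStep r).1), b ++ g.map (fun r => (pyRowStep r).2)) := by
  induction g generalizing a b with
  | nil => simp
  | cons r g ih => simp [List.foldl_cons, ih]

theorem pyRound_eq (g : List (List Int)) :
    pyRound g = (g.map (fun r => (pyRowStep r).1), g.map (fun r => (pyRowStep r).2)) := by
  simpa using pyRound_go g [] []

-- every row nonempty ⇒ pyRowStep emits the sorted heads and leaves the sorted tails
theorem loopA_eq (n : Nat) (g : List (List Int)) (hlen : ∀ r ∈ g, n ≤ r.length) (ans : Int) :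
    loopA n g ans = ans + colSum n (g.map sortDesc) := by
  induction n generalizing g ans with
  | zero => simp [loopA, colSum]
  | succ n ih =>
    have hhead : ∀ r ∈ g, sortDesc r = (sortDesc r).getD 0 0 :: (sortDesc r).tail := by
      intro r hr
      have : (sortDesc r).length = r.length := sortDesc_length r
      have hne : sortDesc r ≠ [] := by
        intro hnil
        have hl := sortDesc_length r
        rw [hnil] at hl
        have := hlen r hr
        simp at hl
        omega
      cases hs : sortDesc r with
      | nil => exact absurd hs hne
      | cons m t => simp
    have hms : g.map (fun r => (pyRowStep r).1)
        = (g.map sortDesc).map (fun r => r.getD 0 0) := by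
      rw [List.map_map]
      exact List.map_congr_left (fun r hr => (pyRowStep_spec r _ _ (hhead r hr)).1)
    have hgs : (g.map (fun r => (pyRowStep r).2)).map sortDesc
        = (g.map sortDesc).map List.tail := by
      rw [List.map_map, List.map_map]
      exact List.map_congr_left (fun r hr => (pyRowStep_spec r _ _ (hhead r hr)).2)
    have hlen' : ∀ r' ∈ g.map (fun r => (pyRowStep r).2), n ≤ r'.length := by
      intro r' hr'
      obtain ⟨r, hr, rfl⟩ := List.mem_map.mp hr'
      have h1 : sortDesc (pyRowStep r).2 = (sortDesc r).tail :=
        (pyRowStep_spec r _ _ (hhead r hr)).2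
      have h2 : ((pyRowStep r).2).length = (sortDesc (pyRowStep r).2).length :=
        (sortDesc_length _).symm
      rw [h1, List.length_tail, sortDesc_length] at h2
      have := hlen r hr
      omega
    show loopA (n+1) g ans = ans + colSum (n+1) (g.map sortDesc)
    rw [loopA, pyRound_eq]
    rw [ih _ hlen', colSum, hms, ← hgs]
    ring

theorem colSum_eq_foldr (n : Nat) (rows : List (List Int)) :
    colSum n rows = ((List.range n).map
      (fun i => (PySem.List.max? (rows.map (fun r => r.getD i 0)) (fun x => x)).getD 0)).sum := by
  induction n generalizing rows with
  | zero => simp [colSum]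
  | succ n ih =>
    rw [colSum, ih, List.range_succ_eq_map]
    simp only [List.map_cons, List.map_map, List.sum_cons]
    congr 2
    apply List.map_congr_left
    intro i _
    congr 1
    congr 1
    apply List.map_congr_left
    intro r _
    cases r <;> simp

theorem foldl_add_eq_sum (l : List Nat) (f : Nat → Int) (c : Int) :
    l.foldl (fun acc i => acc + f i) c = c + (l.map f).sum := by
  induction l generalizing c with
  | nil => simp
  | cons x t ih => simp [List.foldl_cons, ih]; ring

theorem foldl_min_const (t : List Nat) (x : Nat) (h : ∀ y ∈ t, x ≤ y) :
    t.foldl min x = x := by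
  induction t with
  | nil => rfl
  | cons y t ih =>
    rw [List.foldl_cons, min_eq_left (h y (by simp))]
    exact ih (fun z hz => h z (by simp [hz]))

theorem alt_eq_colSum (grid : List (List Int)) (h : Pre_deleteGreatestValue grid) :
    deleteGreatestValue_alt grid = colSum (grid.headD []).length (grid.map sortDesc) := by
  obtain ⟨hne, hlen⟩ := h
  cases grid with
  | nil => exact absurd rfl hne
  | cons g0 gs =>
    simp only [List.headD_cons] at hlen ⊢
    simp only [deleteGreatestValue_alt, List.map_cons]
    have hlg0 : (sortDesc g0).length = g0.length := sortDesc_length g0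
    have hmin : ((gs.map sortDesc).map List.length).foldl min (sortDesc g0).length
        = g0.length := by
      rw [hlg0]
      apply foldl_min_const
      intro y hy
      obtain ⟨r', hr', rfl⟩ := List.mem_map.mp hy
      obtain ⟨r, hr, rfl⟩ := List.mem_map.mp hr'
      rw [sortDesc_length]
      exact hlen r (by simp [hr])
    rw [hmin, foldl_add_eq_sum, colSum_eq_foldr]
    simp

theorem a_eq_colSum (grid : List (List Int)) (h : Pre_deleteGreatestValue grid) :
    deleteGreatestValue grid = colSum (grid.headD []).length (grid.map sortDesc) := by
  obtain ⟨hne, hlen⟩ := h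
  cases grid with
  | nil => exact absurd rfl hne
  | cons g0 gs =>
    simp only [List.headD_cons] at hlen ⊢
    show loopA g0.length (g0 :: gs) 0 = _
    rw [loopA_eq _ _ (fun r hr => hlen r hr)]
    simp

-- ===== VERDICT (by name: the statement is the Claim_ definition above) =====
theorem deleteGreatestValue_spec : Claim_equal_deleteGreatestValue := by
  intro grid _ hpre
  unfold Spec_deleteGreatestValue
  rw [a_eq_colSum grid hpre, alt_eq_colSum grid hpre]
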